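-- pv_equiv track=rewrite | github.com/ddddddwwwwwwwwalg1/leetcode | 数组/斐波拉契数列前n项和.py | func
-- ===== SOURCE A (Python) =====
-- def func(n):
--     if n==0:
--         return 0
--     if n==1:
--         return 1
--     dp = [0,1]
--     res = 0
--     for i in range(2,n):
--         tmp = dp[i-1] + dp[i-2]
--         res += tmp
--         dp.append(tmp)
--     return res
-- ===== SOURCE B (Python) =====
-- def func(n):
--     # fast-doubling Fibonacci; sum F(2..n-1) = F(n+1) - 2 for n >= 2
--     if n == 1:
--         return 1
--     if n < 2:
--         return 0
--
--     def fib_pair(k):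
--         # returns (F(k), F(k+1))
--         if k == 0:
--             return (0, 1)
--         a, b = fib_pair(k >> 1)
--         c = a * (2 * b - a)
--         d = a * a + b * b
--         if k & 1:
--             return (d, c + d)
--         return (c, d)
--
--     return fib_pair(n + 1)[0] - 2
-- ===== Notes on version B (the rewrite author's own statement) =====
-- stated objective: faster
-- what changed: Replaces the O(n) dp-list loop by the closed form sum F(2..n-1) = F(n+1) - 2 computed with recursive fast-doubling Fibonacci (O(log n) multiplications).
import Mathlib
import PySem

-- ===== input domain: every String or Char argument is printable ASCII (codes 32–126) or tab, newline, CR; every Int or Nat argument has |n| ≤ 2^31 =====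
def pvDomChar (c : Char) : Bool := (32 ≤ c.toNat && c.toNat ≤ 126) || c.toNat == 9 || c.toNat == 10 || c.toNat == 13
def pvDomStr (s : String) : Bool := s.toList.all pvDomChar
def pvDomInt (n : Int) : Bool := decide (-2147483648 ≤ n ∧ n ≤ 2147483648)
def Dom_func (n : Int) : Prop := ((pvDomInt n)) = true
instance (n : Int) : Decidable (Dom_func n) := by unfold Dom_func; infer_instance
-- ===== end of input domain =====

-- B replaces A's O(n) dp-list loop by the closed form sum F(2..n-1) = F(n+1)-2
-- computed with recursive fast-doubling Fibonacci (objective: faster, asymptotic).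

-- ===== PORT A =====
def func (n : Int) : Int :=
  if n == 0 then 0
  else if n == 1 then 1
  else
    let st := (PySem.List.pyRange 2 n 1).foldl
      (fun (st : List Int × Int) i =>
        let tmp := PySem.List.pyGetD st.1 (i - 1) 0 + PySem.List.pyGetD st.1 (i - 2) 0
        (st.1 ++ [tmp], st.2 + tmp))
      ([0, 1], 0)
    st.2

-- ===== PORT B =====
-- fib_pair k = (F(k), F(k+1)) by fast doubling (k >> 1 = k / 2, k & 1 = k % 2)
def fibPair : Nat → Int × Int
  | 0 => (0, 1)
  | (k + 1) =>
    let p := fibPair ((k + 1) / 2)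
    let a := p.1
    let b := p.2
    let c := a * (2 * b - a)
    let d := a * a + b * b
    if (k + 1) % 2 == 1 then (d, c + d) else (c, d)
decreasing_by exact Nat.div_lt_self (Nat.succ_pos k) (by omega)

def func_alt (n : Int) : Int :=
  if n == 1 then 1
  else if n < 2 then 0
  else (fibPair (n + 1).toNat).1 - 2

-- ===== PRECONDITION & SPEC =====
def Spec_func (n : Int) (out : Int) : Prop := out = func_alt n
instance (n : Int) (out : Int) : Decidable (Spec_func n out) := by unfold Spec_func; infer_instance

-- ===== CLAIM (what is proved, stated in full; the proofs are below) =====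
def Claim_equal_func : Prop := ∀ (n : Int), Dom_func n → Spec_func n (func n)

-- ===== LEMMAS AND PROOFS =====

theorem fibPair_eq (k : Nat) : fibPair k = ((Nat.fib k : Int), (Nat.fib (k + 1) : Int)) := by
  induction k using Nat.strong_induction_on with
  | _ k ih =>
    match k with
    | 0 => simp [fibPair]
    | (k + 1) =>
      rw [fibPair, ih ((k + 1) / 2) (Nat.div_lt_self (Nat.succ_pos k) (by omega))]
      have hle : Nat.fib ((k + 1) / 2) ≤ 2 * Nat.fib ((k + 1) / 2 + 1) :=
        le_trans Nat.fib_le_fib_succ (by omega)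
      rcases Nat.even_or_odd (k + 1) with he | ho
      · obtain ⟨m, hm⟩ := he
        have h2 : (k + 1) % 2 = 0 := by omega
        have hd : (k + 1) / 2 = m := by omega
        simp only [h2, hd]
        have hmul : Nat.fib (2 * m) = Nat.fib m * (2 * Nat.fib (m + 1) - Nat.fib m) :=
          Nat.fib_two_mul m
        have hmul1 : Nat.fib (2 * m + 1) = Nat.fib (m + 1) ^ 2 + Nat.fib m ^ 2 :=
          Nat.fib_two_mul_add_one m
        have hle' : Nat.fib m ≤ 2 * Nat.fib (m + 1) := hd ▸ hle
        have h1 : k + 1 = 2 * m := by omega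
        rw [h1, if_neg (by decide)]
        simp only [Prod.mk.injEq]
        refine ⟨?_, ?_⟩ <;> push_cast [hmul, hmul1, Nat.cast_sub hle'] <;> ring
      · obtain ⟨m, hm⟩ := ho
        have h2 : (k + 1) % 2 = 1 := by omega
        have hd : (k + 1) / 2 = m := by omega
        simp only [h2, hd]
        have hmul : Nat.fib (2 * m) = Nat.fib m * (2 * Nat.fib (m + 1) - Nat.fib m) :=
          Nat.fib_two_mul m
        have hmul1 : Nat.fib (2 * m + 1) = Nat.fib (m + 1) ^ 2 + Nat.fib m ^ 2 :=
          Nat.fib_two_mul_add_one m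
        have hmul2 : Nat.fib (2 * m + 2) = Nat.fib (2 * m) + Nat.fib (2 * m + 1) :=
          Nat.fib_add_two
        have hle' : Nat.fib m ≤ 2 * Nat.fib (m + 1) := hd ▸ hle
        have h1 : k + 1 = 2 * m + 1 := by omega
        rw [h1, if_pos (by decide)]
        simp only [Prod.mk.injEq]
        refine ⟨?_, ?_⟩ <;>
          push_cast [hmul2, hmul, hmul1, Nat.cast_sub hle'] <;> ring

-- the loop invariant of A: after the iterations i = 2 .. 2+m,
-- dp is [F 0, …, F (m+1)] and res is F (m+3) - 2
theorem loopA (m : Nat) :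
    (PySem.List.pyRange 2 (2 + (m : Int)) 1).foldl
      (fun (st : List Int × Int) i =>
        let tmp := PySem.List.pyGetD st.1 (i - 1) 0 + PySem.List.pyGetD st.1 (i - 2) 0
        (st.1 ++ [tmp], st.2 + tmp))
      ([0, 1], 0)
    = ((List.range (m + 2)).map (fun j => (Nat.fib j : Int)), (Nat.fib (m + 3) : Int) - 2) := by
  induction m with
  | zero =>
    rw [PySem.List.pyRange_one_eq_nil (by omega)]
    simp only [List.foldl_nil]
    decide
  | succ m ih =>
    have hsplit : PySem.List.pyRange 2 (2 + ((m : Int) + 1)) 1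
        = PySem.List.pyRange 2 (2 + (m : Int)) 1 ++ [2 + (m : Int)] := by
      have : (2 : Int) + ((m : Int) + 1) = (2 + (m : Int)) + 1 := by ring
      rw [this, PySem.List.pyRange_one_succ_right (by omega)]
    push_cast
    rw [hsplit, List.foldl_append, ih]
    simp only [List.foldl]
    have hlen : ((List.range (m + 2)).map (fun j => (Nat.fib j : Int))).length = m + 2 := by
      simp
    have hg1 : PySem.List.pyGetD ((List.range (m + 2)).map (fun j => (Nat.fib j : Int)))
        (2 + (m : Int) - 1) 0 = (Nat.fib (m + 1) : Int) := by
      rw [show (2 : Int) + (m : Int) - 1 = ((m + 1 : Nat) : Int) by push_cast; ring,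
        PySem.List.pyGetD_natCast]
      rw [List.getD_eq_getElem _ _ (by simp)]
      simp
    have hg2 : PySem.List.pyGetD ((List.range (m + 2)).map (fun j => (Nat.fib j : Int)))
        (2 + (m : Int) - 2) 0 = (Nat.fib m : Int) := by
      rw [show (2 : Int) + (m : Int) - 2 = ((m : Nat) : Int) by push_cast; ring,
        PySem.List.pyGetD_natCast]
      rw [List.getD_eq_getElem _ _ (by simp)]
      simp
    rw [hg1, hg2]
    have h2n : Nat.fib (m + 2) = Nat.fib m + Nat.fib (m + 1) := Nat.fib_add_two
    have h4n : Nat.fib (m + 4) = Nat.fib (m + 2) + Nat.fib (m + 3) := Nat.fib_add_two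
    simp only [Prod.mk.injEq]
    refine ⟨?_, ?_⟩
    · have hone : (Nat.fib (m + 1) : Int) + (Nat.fib m : Int) = (Nat.fib (m + 2) : Int) := by
        push_cast [h2n]; ring
      simp [List.range_succ, hone]
    · rw [show m + 1 + 3 = m + 4 from rfl]
      push_cast [h4n, h2n]; ring

-- ===== VERDICT (by name: the statement is the Claim_ definition above) =====
theorem func_spec : Claim_equal_func := by
  intro n _
  unfold Spec_func func func_alt
  by_cases h0 : n = 0
  · simp [h0]
  by_cases h1 : n = 1
  · simp [h1]
  rw [if_neg (by simpa using h0), if_neg (by simpa using h1)]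
  by_cases hlt : n < 2
  · rw [PySem.List.pyRange_one_eq_nil (by omega)]
    rw [if_neg (by simpa using h1), if_pos hlt]
    rfl
  · have hm : n = 2 + ((n - 2).toNat : Int) := by omega
    rw [hm, loopA ((n - 2).toNat)]
    rw [if_neg (by simp only [beq_iff_eq]; omega), if_neg (by omega)]
    rw [show (2 + ((n - 2).toNat : Int) + 1).toNat = (n - 2).toNat + 3 by omega, fibPair_eq]
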